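-- pv_equiv track=rewrite | github.com/atconeyisland/Cascade | src/cascade_env/tasks/task3.py | is_resolved
-- ===== SOURCE A (Python) =====
-- CORRECT_RUNBOOK = "network-runbook"
--
-- CORRECT_INVESTIGATION = "network"
--
-- CORRECT_STEPS = [
--     "failover inventory-service",
--     "failover order-service",
--     "failover notification-service"
-- ]
--
-- def is_resolved(steps_taken: list) -> bool:
--     steps_lower = [s.lower() for s in steps_taken]
--     has_correct_runbook = any(CORRECT_RUNBOOK in s for s in steps_lower)
--     has_investigation = any(
--         CORRECT_INVESTIGATION in s for s in steps_lower
--     )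
--     has_fix = any(
--         any(correct in s for correct in CORRECT_STEPS)
--         for s in steps_lower
--     )
--     has_escalation = any("escalate_to_human" in s for s in steps_lower)
--     return has_correct_runbook and has_investigation and has_fix and has_escalation
-- ===== SOURCE B (Python) =====
-- CORRECT_RUNBOOK = "network-runbook"
-- CORRECT_INVESTIGATION = "network"
-- CORRECT_STEPS = [
--     "failover inventory-service",
--     "failover order-service",
--     "failover notification-service"
-- ]
--
-- def is_resolved(steps_taken: list) -> bool:
--     runbook = investigation = fix = escalation = False
--     for step in steps_taken:
--         s = step.lower()
--         runbook = runbook or CORRECT_RUNBOOK in s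
--         investigation = investigation or CORRECT_INVESTIGATION in s
--         fix = fix or any(correct in s for correct in CORRECT_STEPS)
--         escalation = escalation or "escalate_to_human" in s
--         if runbook and investigation and fix and escalation:
--             break
--     return runbook and investigation and fix and escalation
-- ===== Notes on version B (the rewrite author's own statement) =====
-- stated objective: alternative
-- what changed: Replaces four separate any()-scans over a pre-built lowered copy of the list with one single-pass loop that lowercases each step once, ORs the four substring tests into running flags, and breaks early once all four are satisfied.
import Mathlib
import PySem

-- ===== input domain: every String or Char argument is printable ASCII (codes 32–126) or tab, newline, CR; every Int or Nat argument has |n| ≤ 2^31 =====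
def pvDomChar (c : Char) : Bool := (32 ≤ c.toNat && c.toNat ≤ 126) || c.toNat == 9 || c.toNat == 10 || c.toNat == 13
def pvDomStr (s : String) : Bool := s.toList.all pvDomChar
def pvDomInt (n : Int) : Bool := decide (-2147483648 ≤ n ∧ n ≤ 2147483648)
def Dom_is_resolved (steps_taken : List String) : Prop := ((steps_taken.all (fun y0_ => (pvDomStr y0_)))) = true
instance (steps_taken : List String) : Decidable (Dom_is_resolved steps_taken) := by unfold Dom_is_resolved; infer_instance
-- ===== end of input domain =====

-- B is a single-pass loop with four running flags and an early break, instead of A's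
-- four separate any() scans over a pre-built lowered list; same results, alternative structure.

def CORRECT_RUNBOOK : String := "network-runbook"
def CORRECT_INVESTIGATION : String := "network"
def CORRECT_STEPS : List String := [
  "failover inventory-service",
  "failover order-service",
  "failover notification-service"]

-- ===== PORT A =====
def is_resolved (steps_taken : List String) : Bool :=
  let steps_lower := steps_taken.map (fun s => PySem.Str.lower s)
  let has_correct_runbook := steps_lower.any (fun s => PySem.Str.isIn CORRECT_RUNBOOK s)
  let has_investigation := steps_lower.any (fun s => PySem.Str.isIn CORRECT_INVESTIGATION s)
  let has_fix := steps_lower.any (fun s => CORRECT_STEPS.any (fun correct => PySem.Str.isIn correct s))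
  let has_escalation := steps_lower.any (fun s => PySem.Str.isIn "escalate_to_human" s)
  has_correct_runbook && has_investigation && has_fix && has_escalation

-- ===== PORT B =====
-- loop of Source B: four flags threaded through the recursion, early break when all hold
def isResolvedLoop : List String → Bool → Bool → Bool → Bool → Bool
  | [], r, i, f, e => r && i && f && e
  | step :: rest, r, i, f, e =>
    let s := PySem.Str.lower step
    let r := r || PySem.Str.isIn CORRECT_RUNBOOK s
    let i := i || PySem.Str.isIn CORRECT_INVESTIGATION s
    let f := f || CORRECT_STEPS.any (fun correct => PySem.Str.isIn correct s)
    let e := e || PySem.Str.isIn "escalate_to_human" s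
    if r && i && f && e then r && i && f && e
    else isResolvedLoop rest r i f e

def is_resolved_alt (steps_taken : List String) : Bool :=
  isResolvedLoop steps_taken false false false false

-- ===== PRECONDITION & SPEC =====
def Spec_is_resolved (steps_taken : List String) (out : Bool) : Prop := out = is_resolved_alt steps_taken
instance (steps_taken : List String) (out : Bool) : Decidable (Spec_is_resolved steps_taken out) := by unfold Spec_is_resolved; infer_instance

-- ===== CLAIM (what is proved, stated in full; the proofs are below) =====
def Claim_equal_is_resolved : Prop := ∀ (steps_taken : List String), Dom_is_resolved steps_taken → Spec_is_resolved steps_taken (is_resolved steps_taken)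

-- ===== LEMMAS AND PROOFS =====

theorem isResolvedLoop_eq (xs : List String) (r i f e : Bool) :
    isResolvedLoop xs r i f e =
      ((r || xs.any (fun s => PySem.Str.isIn CORRECT_RUNBOOK (PySem.Str.lower s))) &&
       (i || xs.any (fun s => PySem.Str.isIn CORRECT_INVESTIGATION (PySem.Str.lower s))) &&
       (f || xs.any (fun s => CORRECT_STEPS.any (fun c => PySem.Str.isIn c (PySem.Str.lower s)))) &&
       (e || xs.any (fun s => PySem.Str.isIn "escalate_to_human" (PySem.Str.lower s)))) := by
  induction xs generalizing r i f e with
  | nil => simp [isResolvedLoop]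
  | cons x rest ih =>
    simp only [isResolvedLoop, List.any_cons]
    split
    · rename_i h
      simp only [Bool.and_eq_true] at h
      obtain ⟨⟨⟨hr, hi⟩, hf⟩, he⟩ := h
      simp only [Bool.or_eq_true] at hr hi hf he
      simp at hr hi hf he
      rcases hr with hr|hr <;> rcases hi with hi|hi <;> rcases hf with hf|hf <;>
        rcases he with he|he <;> simp [hr, hi, hf, he] <;>
        simp [List.any_eq_true.mpr hf]
    · rw [ih]
      simp [Bool.or_assoc]

theorem is_resolved_spec : Claim_equal_is_resolved := by
  intro steps _
  unfold Spec_is_resolved is_resolved is_resolved_alt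
  rw [isResolvedLoop_eq]
  simp [List.any_map, Function.comp_def]
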